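-- pv_equiv track=rewrite | github.com/ClinIQSoftware/eduresearch-project-manager | backend/app/middleware/tenant.py | _extract_subdomain
-- ===== SOURCE A (Python) =====
-- HOSTING_DOMAINS = {"onrender.com", "render.com", "herokuapp.com", "railway.app"}
--
-- _HOSTING_DOMAIN = "__hosting__"
--
-- def _extract_subdomain(host: str) -> str:
--     """Extract subdomain from host header."""
--     # Remove port if present
--     host = host.split(":")[0]
--
--     # Handle localhost
--     if host in ("localhost", "127.0.0.1"):
--         return "localhost"
--
--     # Check if this is a known hosting provider domain
--     for hosting_domain in HOSTING_DOMAINS: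
--         if host.endswith(f".{hosting_domain}"):
--             return _HOSTING_DOMAIN
--
--     # Extract first part of domain
--     parts = host.split(".")
--     if len(parts) >= 3:
--         return parts[0]
--
--     return ""
-- ===== SOURCE B (Python) =====
-- HOSTING_DOMAINS = {"onrender.com", "render.com", "herokuapp.com", "railway.app"}
--
-- _HOSTING_DOMAIN = "__hosting__"
--
-- def _extract_subdomain(host: str) -> str:
--     """Extract subdomain from host header."""
--     # Remove port if present
--     host = host.split(":")[0]
--
--     # Handle localhost
--     if host in ("localhost", "127.0.0.1"):
--         return "localhost"
--
--     # Split once; every hosting domain is exactly two labels, so the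
--     # endswith scan is one membership test on the last two labels.
--     parts = host.split(".")
--     if len(parts) >= 3:
--         if ".".join(parts[-2:]) in HOSTING_DOMAINS:
--             return _HOSTING_DOMAIN
--         return parts[0]
--     return ""
-- ===== Notes on version B (the rewrite author's own statement) =====
-- stated objective: idiomatic
-- what changed: B splits the host into labels once and tests the '.'-joined last two labels against the HOSTING_DOMAINS set with a single membership lookup (guarded by len(parts) >= 3), instead of A's loop running endswith over every hosting domain; the split/first-label extraction is shared with the hosting check rather than redone.
import Mathlib
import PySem

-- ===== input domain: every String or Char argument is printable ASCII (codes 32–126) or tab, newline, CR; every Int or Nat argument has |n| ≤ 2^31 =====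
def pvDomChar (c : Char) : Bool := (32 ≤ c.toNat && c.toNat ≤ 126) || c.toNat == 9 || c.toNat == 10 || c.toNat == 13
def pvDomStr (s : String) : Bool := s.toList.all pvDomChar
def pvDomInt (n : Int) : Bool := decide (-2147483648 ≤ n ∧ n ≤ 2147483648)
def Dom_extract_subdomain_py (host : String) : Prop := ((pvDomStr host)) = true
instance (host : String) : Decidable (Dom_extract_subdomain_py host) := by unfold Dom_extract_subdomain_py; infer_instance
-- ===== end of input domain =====

-- B replaces A's per-domain endswith loop by splitting the host once and testing the joined
-- last two labels against the hosting set in one membership lookup (objective: idiomatic).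

-- ===== PORT A =====
-- host.split(":") / host.split(".") always return a nonempty list for a nonempty separator,
-- so the `.getD []` / `.headD ""` defaults below are never used (exact).
-- The Python `for hosting_domain in HOSTING_DOMAINS` loop is unrolled in a fixed order; every
-- hit returns the same value "__hosting__", so the set's iteration order cannot affect the result.
def extract_subdomain_py (host : String) : String :=
  let host := ((PySem.Str.split? host ":").getD []).headD ""
  if host == "localhost" || host == "127.0.0.1" then "localhost"
  else if PySem.Str.endswith host ".onrender.com" || PySem.Str.endswith host ".render.com"
       || PySem.Str.endswith host ".herokuapp.com" || PySem.Str.endswith host ".railway.app" then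
    "__hosting__"
  else
    let parts := (PySem.Str.split? host ".").getD []
    if 3 ≤ parts.length then parts.headD "" else ""

-- ===== PORT B =====
def hostingDomains : PySem.Set String :=
  PySem.Set.ofList ["onrender.com", "render.com", "herokuapp.com", "railway.app"]

def extract_subdomain_py_alt (host : String) : String :=
  let host := ((PySem.Str.split? host ":").getD []).headD ""
  if host == "localhost" || host == "127.0.0.1" then "localhost"
  else
    let parts := (PySem.Str.split? host ".").getD []
    if 3 ≤ parts.length then
      if PySem.Str.join "." (PySem.List.slice parts (some (-2)) none) ∈ hostingDomains then
        "__hosting__"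
      else parts.headD ""
    else ""

-- ===== PRECONDITION & SPEC =====
def Spec_extract_subdomain_py (host : String) (out : String) : Prop := out = extract_subdomain_py_alt host
instance (host : String) (out : String) : Decidable (Spec_extract_subdomain_py host out) := by unfold Spec_extract_subdomain_py; infer_instance

-- ===== CLAIM (what is proved, stated in full; the proofs are below) =====
def Claim_equal_extract_subdomain_py : Prop := ∀ (host : String), Dom_extract_subdomain_py host → Spec_extract_subdomain_py host (extract_subdomain_py host)

-- ===== LEMMAS AND PROOFS =====

-- dotParts is the specification of Python's host.split("."): the list of maximal dot-free segments.
def dotParts : List Char → List (List Char)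
  | [] => [[]]
  | c :: t => if c = '.' then [] :: dotParts t else (dotParts t).modifyHead (c :: ·)

theorem dotParts_ne_nil (cs : List Char) : dotParts cs ≠ [] := by
  cases cs with
  | nil => simp [dotParts]
  | cons c t =>
    have := dotParts_ne_nil t
    simp only [dotParts]
    split
    · simp
    · cases h : dotParts t with
      | nil => exact absurd h this
      | cons p ps => simp

theorem go_eq (fuel : Nat) : ∀ (l : List Char), l.length ≤ fuel → ∀ (cur : List Char) (acc : List (List Char)),
    PySem.Chars.splitOn.go ['.'] fuel l cur acc = acc.reverse ++ (dotParts l).modifyHead (cur.reverse ++ ·) := by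
  induction fuel with
  | zero =>
    intro l hl cur acc
    have : l = [] := List.eq_nil_of_length_eq_zero (Nat.le_zero.mp hl)
    subst this
    simp [PySem.Chars.splitOn.go, dotParts]
  | succ fuel ih =>
    intro l hl cur acc
    cases l with
    | nil => simp [PySem.Chars.splitOn.go, dotParts]
    | cons c t =>
      by_cases hc : c = '.'
      · subst hc
        rw [PySem.Chars.splitOn.go]
        simp only [List.isPrefixOf, Bool.and_true, beq_self_eq_true, if_pos]
        rw [show List.drop (['.'].length) ('.' :: t) = t from rfl]
        rw [ih t (by simpa using hl) [] _]
        cases hdp : dotParts t with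
        | nil => exact absurd hdp (dotParts_ne_nil t)
        | cons p ps => simp [dotParts, hdp]
      · rw [PySem.Chars.splitOn.go]
        have hpre : List.isPrefixOf ['.'] (c :: t) = false := by
          simp [List.isPrefixOf]; exact fun h => absurd h.symm hc
        simp only [hpre, Bool.false_eq_true, if_false]
        rw [ih t (by simpa using hl) (c :: cur) acc]
        cases hdp : dotParts t with
        | nil => exact absurd hdp (dotParts_ne_nil t)
        | cons p ps => simp [dotParts, hc, hdp]

theorem splitOn_eq_dotParts (cs : List Char) : PySem.Chars.splitOn cs ['.'] = dotParts cs := by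
  rw [PySem.Chars.splitOn, go_eq (cs.length + 1) cs (by omega) [] []]
  cases h : dotParts cs with
  | nil => exact absurd h (dotParts_ne_nil cs)
  | cons p ps => simp

theorem dotParts_append (a b : List Char) : dotParts (a ++ '.' :: b) = dotParts a ++ dotParts b := by
  induction a with
  | nil =>
    simp [dotParts]
  | cons c a' ih =>
    by_cases hc : c = '.'
    · subst hc; simp [dotParts, ih]
    · simp only [List.cons_append, dotParts, if_neg hc, ih]
      cases h : dotParts a' with
      | nil => exact absurd h (dotParts_ne_nil a')
      | cons p ps => simp

theorem dotParts_no_dot (d : List Char) (h : '.' ∉ d) : dotParts d = [d] := by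
  induction d with
  | nil => simp [dotParts]
  | cons c t ih =>
    simp only [List.mem_cons, not_or] at h
    have hc : ¬ c = '.' := fun hh => h.1 hh.symm
    simp [dotParts, hc, ih h.2]

theorem join_head_append (x p : List Char) (ps : List (List Char)) :
    PySem.Chars.join ['.'] ((x ++ p) :: ps) = x ++ PySem.Chars.join ['.'] (p :: ps) := by
  cases ps with
  | nil => simp [PySem.Chars.join_singleton]
  | cons q qs => simp [PySem.Chars.join_cons_cons]

theorem join_dotParts (cs : List Char) : PySem.Chars.join ['.'] (dotParts cs) = cs := by
  induction cs with
  | nil => simp [dotParts, PySem.Chars.join_singleton]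
  | cons c t ih =>
    by_cases hc : c = '.'
    · subst hc
      have hdp : dotParts ('.' :: t) = [] :: dotParts t := by simp [dotParts]
      cases h : dotParts t with
      | nil => exact absurd h (dotParts_ne_nil t)
      | cons p ps =>
        rw [h] at ih hdp
        rw [hdp, PySem.Chars.join_cons_cons]
        simp [ih]
    · simp only [dotParts, if_neg hc]
      cases h : dotParts t with
      | nil => exact absurd h (dotParts_ne_nil t)
      | cons p ps =>
        rw [h] at ih
        have := join_head_append [c] p ps
        simp only [List.modifyHead, List.cons_append, List.nil_append] at this ⊢
        rw [this, ih]

theorem mem_dotParts_no_dot (cs p : List Char) (hp : p ∈ dotParts cs) : '.' ∉ p := by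
  induction cs generalizing p with
  | nil => simp [dotParts] at hp; simp [hp]
  | cons c t ih =>
    by_cases hc : c = '.'
    · subst hc
      have hdp : dotParts ('.' :: t) = [] :: dotParts t := by simp [dotParts]
      rw [hdp, List.mem_cons] at hp
      rcases hp with rfl | hp
      · simp
      · exact ih p hp
    · simp only [dotParts, if_neg hc] at hp
      cases h : dotParts t with
      | nil => exact absurd h (dotParts_ne_nil t)
      | cons q qs =>
        rw [h] at hp
        simp only [List.modifyHead, List.mem_cons] at hp
        rcases hp with rfl | hp
        · have hq : '.' ∉ q := ih q (by rw [h]; exact List.mem_cons_self ..)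
          have hc' : ¬ '.' = c := fun hh => hc hh.symm
          simp [hc', hq]
        · exact ih p (by rw [h]; exact List.mem_cons_of_mem _ hp)

theorem join_append_two (q : List (List Char)) (hq : q ≠ []) (a b : List Char) :
    PySem.Chars.join ['.'] (q ++ [a, b]) = PySem.Chars.join ['.'] q ++ '.' :: (a ++ '.' :: b) := by
  induction q with
  | nil => exact absurd rfl hq
  | cons x q' ih =>
    cases q' with
    | nil => simp [PySem.Chars.join_cons_cons, PySem.Chars.join_singleton]
    | cons y q'' =>
      rw [show (x :: y :: q'') ++ [a, b] = x :: y :: (q'' ++ [a, b]) from by simp]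
      rw [PySem.Chars.join_cons_cons]
      have ihe := ih (by simp)
      rw [show (y :: q'') ++ [a, b] = y :: (q'' ++ [a, b]) from by simp] at ihe
      rw [ihe, PySem.Chars.join_cons_cons]
      simp

theorem split_unique (x y d1 d2 : List Char) (hx : '.' ∉ x) (hd : '.' ∉ d1) :
    x ++ '.' :: y = d1 ++ '.' :: d2 → x = d1 ∧ y = d2 := by
  induction x generalizing d1 with
  | nil =>
    intro h
    cases d1 with
    | nil => simpa using h
    | cons e d1' =>
      simp only [List.nil_append, List.cons_append, List.cons.injEq] at h
      exact absurd (h.1 ▸ List.mem_cons_self ..) hd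
  | cons c x' ih =>
    intro h
    cases d1 with
    | nil =>
      simp only [List.cons_append, List.nil_append, List.cons.injEq] at h
      exact absurd (h.1 ▸ List.mem_cons_self ..) hx
    | cons e d1' =>
      simp only [List.cons_append, List.cons.injEq] at h
      have := ih (by simp at hx; simp [hx.2]) (d1 := d1') (by simp at hd; simp [hd.2]) h.2
      exact ⟨by simp [h.1, this.1], this.2⟩

theorem hosting_iff (cs d1 d2 : List Char) (h1 : '.' ∉ d1) (h2 : '.' ∉ d2) :
    ('.' :: (d1 ++ '.' :: d2)) <:+ cs ↔
      (3 ≤ (dotParts cs).length ∧ (dotParts cs).drop ((dotParts cs).length - 2) = [d1, d2]) := by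
  constructor
  · rintro ⟨x, rfl⟩
    have h := dotParts_append x (d1 ++ '.' :: d2)
    rw [dotParts_append d1 d2, dotParts_no_dot d1 h1, dotParts_no_dot d2 h2] at h
    rw [h]
    have hx := dotParts_ne_nil x
    have hlen : (dotParts x).length ≥ 1 := by
      cases hh : dotParts x with
      | nil => exact absurd hh hx
      | cons p ps => simp
    rw [show [d1] ++ [d2] = [d1, d2] from rfl]
    constructor
    · simp; omega
    · have h2' : (dotParts x ++ [d1, d2]).length - 2 = (dotParts x).length := by simp
      rw [h2', List.drop_left]
  · rintro ⟨hlen, hdrop⟩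
    have hsplit := List.take_append_drop ((dotParts cs).length - 2) (dotParts cs)
    rw [hdrop] at hsplit
    have hq : (dotParts cs).take ((dotParts cs).length - 2) ≠ [] := by
      have : ((dotParts cs).take ((dotParts cs).length - 2)).length = (dotParts cs).length - 2 := by
        rw [List.length_take]; omega
      intro hnil; rw [hnil] at this; simp at this; omega
    have hj := join_append_two _ hq d1 d2
    rw [hsplit] at hj
    exact ⟨_, by rw [← hj, join_dotParts]⟩

theorem ofList_eq_iff (l : List Char) (s : String) : String.ofList l = s ↔ l = s.toList := by
  constructor
  · intro h; rw [← h, String.toList_ofList]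
  · intro h; subst h; exact String.ofList_toList

theorem slice_neg2 {α : Type} (l : List α) (h : 3 ≤ l.length) :
    PySem.List.slice l (some (-2)) none = l.drop (l.length - 2) := by
  have ha : PySem.List.clampIdx l.length (-2) = l.length - 2 := by
    unfold PySem.List.clampIdx
    rw [if_pos (by omega : (-2 : Int) < 0), if_neg (by omega : ¬ ((l.length : Int) + (-2) < 0))]
    omega
  show List.take (l.length - PySem.List.clampIdx l.length (-2)) (List.drop (PySem.List.clampIdx l.length (-2)) l) = _
  rw [ha, show l.length - (l.length - 2) = 2 from by omega]
  apply List.take_of_length_le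
  rw [List.length_drop]
  omega

theorem split_getD (h : String) :
    (PySem.Str.split? h ".").getD [] = (dotParts h.toList).map String.ofList := by
  rw [PySem.Str.split?, show (".").toList = ['.'] from rfl, PySem.Chars.split?]
  simp [splitOn_eq_dotParts]

theorem one_domain (h : String) (d1 d2 : List Char) (h1 : '.' ∉ d1) (h2 : '.' ∉ d2) (s : String)
    (hs : s.toList = '.' :: (d1 ++ '.' :: d2)) :
    PySem.Str.endswith h s = true ↔
      (3 ≤ (dotParts h.toList).length ∧
        (dotParts h.toList).drop ((dotParts h.toList).length - 2) = [d1, d2]) := by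
  rw [PySem.Str.endswith_eq, PySem.Chars.endswith_iff, hs]
  exact hosting_iff _ _ _ h1 h2

theorem suffix_join (P : List (List Char)) (hlen : 3 ≤ P.length) (x y : List Char)
    (hd : P.drop (P.length - 2) = [x, y]) :
    PySem.Str.join "." (PySem.List.slice (P.map String.ofList) (some (-2)) none) = String.ofList (x ++ '.' :: y) := by
  rw [slice_neg2 _ (by simpa using hlen), List.length_map, ← List.map_drop, hd]
  rw [PySem.Str.join]
  simp only [List.map_cons, List.map_nil, String.toList_ofList]
  have hj : PySem.Chars.join ['.'] [x, y] = x ++ '.' :: y := by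
    rw [PySem.Chars.join_cons_cons, PySem.Chars.join_singleton]; simp
  rw [show (".").toList = ['.'] from rfl, hj]

theorem seg_eq (x y d1 d2 : List Char) (hx : '.' ∉ x) (hd : '.' ∉ d1) :
    x ++ '.' :: y = d1 ++ '.' :: d2 ↔ (x = d1 ∧ y = d2) :=
  ⟨split_unique x y d1 d2 hx hd, by rintro ⟨rfl, rfl⟩; rfl⟩

theorem mem_hosting_iff (x y : List Char) (hx : '.' ∉ x) :
    String.ofList (x ++ '.' :: y) ∈ hostingDomains ↔
      ((x = "onrender".toList ∧ y = "com".toList) ∨ (x = "render".toList ∧ y = "com".toList) ∨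
       (x = "herokuapp".toList ∧ y = "com".toList) ∨ (x = "railway".toList ∧ y = "app".toList)) := by
  unfold hostingDomains
  rw [PySem.Set.mem_ofList]
  simp only [List.mem_cons, List.not_mem_nil, or_false, ofList_eq_iff]
  rw [show ("onrender.com").toList = "onrender".toList ++ '.' :: "com".toList from by decide,
      show ("render.com").toList = "render".toList ++ '.' :: "com".toList from by decide,
      show ("herokuapp.com").toList = "herokuapp".toList ++ '.' :: "com".toList from by decide,
      show ("railway.app").toList = "railway".toList ++ '.' :: "app".toList from by decide]
  rw [seg_eq x y _ _ hx (by decide), seg_eq x y _ _ hx (by decide),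
      seg_eq x y _ _ hx (by decide), seg_eq x y _ _ hx (by decide)]

theorem cond_eq (h : String) :
    (PySem.Str.endswith h ".onrender.com" || PySem.Str.endswith h ".render.com"
      || PySem.Str.endswith h ".herokuapp.com" || PySem.Str.endswith h ".railway.app") = true
    ↔ (3 ≤ ((PySem.Str.split? h ".").getD []).length ∧
        PySem.Str.join "." (PySem.List.slice ((PySem.Str.split? h ".").getD []) (some (-2)) none) ∈ hostingDomains) := by
  have e1 := one_domain h "onrender".toList "com".toList (by decide) (by decide) ".onrender.com" (by decide)
  have e2 := one_domain h "render".toList "com".toList (by decide) (by decide) ".render.com" (by decide)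
  have e3 := one_domain h "herokuapp".toList "com".toList (by decide) (by decide) ".herokuapp.com" (by decide)
  have e4 := one_domain h "railway".toList "app".toList (by decide) (by decide) ".railway.app" (by decide)
  rw [split_getD h]
  constructor
  · intro hc
    simp only [Bool.or_eq_true] at hc
    rcases hc with (((hc | hc) | hc) | hc)
    · obtain ⟨hlen, hdrop⟩ := e1.mp hc
      exact ⟨by simpa using hlen, by rw [suffix_join _ hlen _ _ hdrop]; decide⟩
    · obtain ⟨hlen, hdrop⟩ := e2.mp hc
      exact ⟨by simpa using hlen, by rw [suffix_join _ hlen _ _ hdrop]; decide⟩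
    · obtain ⟨hlen, hdrop⟩ := e3.mp hc
      exact ⟨by simpa using hlen, by rw [suffix_join _ hlen _ _ hdrop]; decide⟩
    · obtain ⟨hlen, hdrop⟩ := e4.mp hc
      exact ⟨by simpa using hlen, by rw [suffix_join _ hlen _ _ hdrop]; decide⟩
  · rintro ⟨hlen', hmem⟩
    have hlen : 3 ≤ (dotParts h.toList).length := by simpa using hlen'
    have hd2 : ((dotParts h.toList).drop ((dotParts h.toList).length - 2)).length = 2 := by
      rw [List.length_drop]; omega
    obtain ⟨x, y, hxy⟩ : ∃ x y, (dotParts h.toList).drop ((dotParts h.toList).length - 2) = [x, y] := by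
      cases hh : (dotParts h.toList).drop ((dotParts h.toList).length - 2) with
      | nil => rw [hh] at hd2; simp at hd2
      | cons a t =>
        cases t with
        | nil => rw [hh] at hd2; simp at hd2
        | cons b t2 =>
          cases t2 with
          | nil => exact ⟨a, b, rfl⟩
          | cons c t3 => rw [hh] at hd2; simp at hd2
    rw [suffix_join _ hlen _ _ hxy] at hmem
    have hxP : x ∈ dotParts h.toList := by
      have hmm : x ∈ List.drop ((dotParts h.toList).length - 2) (dotParts h.toList) := by
        rw [hxy]; simp
      exact List.mem_of_mem_drop hmm
    have hx := mem_dotParts_no_dot _ x hxP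
    simp only [Bool.or_eq_true]
    rcases (mem_hosting_iff x y hx).mp hmem with ⟨rfl, rfl⟩ | ⟨rfl, rfl⟩ | ⟨rfl, rfl⟩ | ⟨rfl, rfl⟩
    · exact Or.inl (Or.inl (Or.inl (e1.mpr ⟨hlen, hxy⟩)))
    · exact Or.inl (Or.inl (Or.inr (e2.mpr ⟨hlen, hxy⟩)))
    · exact Or.inl (Or.inr (e3.mpr ⟨hlen, hxy⟩))
    · exact Or.inr (e4.mpr ⟨hlen, hxy⟩)

-- ===== VERDICT (by name: the statement is the Claim_ definition above) =====
theorem extract_subdomain_py_spec : Claim_equal_extract_subdomain_py := by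
  intro host _
  unfold Spec_extract_subdomain_py extract_subdomain_py extract_subdomain_py_alt
  generalize ((PySem.Str.split? host ":").getD []).headD "" = h
  by_cases hloc : (h == "localhost" || h == "127.0.0.1") = true
  · simp [hloc]
  · rw [Bool.not_eq_true] at hloc
    simp only [hloc, Bool.false_eq_true, if_false]
    by_cases hcond : (PySem.Str.endswith h ".onrender.com" || PySem.Str.endswith h ".render.com"
      || PySem.Str.endswith h ".herokuapp.com" || PySem.Str.endswith h ".railway.app") = true
    · obtain ⟨hlen, hmem⟩ := (cond_eq h).mp hcond
      rw [if_pos hcond, if_pos hlen, if_pos hmem]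
    · rw [Bool.not_eq_true] at hcond
      simp only [hcond, Bool.false_eq_true, if_false]
      by_cases hlen : 3 ≤ ((PySem.Str.split? h ".").getD []).length
      · have hmem : ¬ PySem.Str.join "." (PySem.List.slice ((PySem.Str.split? h ".").getD []) (some (-2)) none) ∈ hostingDomains := by
          intro hm
          have := (cond_eq h).mpr ⟨hlen, hm⟩
          rw [this] at hcond; exact Bool.false_ne_true hcond.symm
        rw [if_pos hlen, if_pos hlen, if_neg hmem]
      · rw [if_neg hlen, if_neg hlen]
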